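-- pv_equiv track=rewrite | github.com/bxuecarnegie/bmc_loci | uniprot_to_fa_annotated.py | get_arabidopsis_gene_id
-- ===== SOURCE A (Python) =====
-- def parse_uniprot_cross_ref(uniprot_cr_tag, resource_abbr, indices=None):
--     cross_ref_list = []
--     for cr in uniprot_cr_tag:
--         if cr[0].lower() == resource_abbr.lower():
--             try:
--                 if indices is None:
--                     cross_ref_list.append(cr[1:])
--                 else:
--                     cross_ref_list.append([r for idx, r in enumerate(cr) if idx in indices])
--             except IndexError:
--                 continue
--     return cross_ref_list
--
-- def get_arabidopsis_gene_id(uniprot_cr_tag):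
--     araport_list = parse_uniprot_cross_ref(uniprot_cr_tag, "Araport", [1])
--     tair_list = parse_uniprot_cross_ref(uniprot_cr_tag, "TAIR", [2])
--     ensemblplants_list = parse_uniprot_cross_ref(uniprot_cr_tag, "EnsemblPlants", [3])
--     gene_id_list = set([cr_id for cr_list in araport_list + tair_list + ensemblplants_list for cr_id in cr_list])
--     try:
--         return sorted(gene_id_list)[0]
--     except IndexError:
--         return None
-- ===== SOURCE B (Python) =====
-- def get_arabidopsis_gene_id(uniprot_cr_tag):
--     res_idx = {'araport': 1, 'tair': 2, 'ensemblplants': 3}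
--     ids = set()
--     for cr in uniprot_cr_tag:
--         idx = res_idx.get(cr[0].lower())
--         if idx is not None and idx < len(cr):
--             ids.add(cr[idx])
--     return min(ids) if ids else None
-- ===== Notes on version B (the rewrite author's own statement) =====
-- stated objective: simpler
-- what changed: Replaces the three parse_uniprot_cross_ref passes (filter per resource, concatenate, set, sorted()[0]) with a single loop that dispatches each entry through a resource-name->index dict, collects ids into one set, and returns min(ids).
import Mathlib
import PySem

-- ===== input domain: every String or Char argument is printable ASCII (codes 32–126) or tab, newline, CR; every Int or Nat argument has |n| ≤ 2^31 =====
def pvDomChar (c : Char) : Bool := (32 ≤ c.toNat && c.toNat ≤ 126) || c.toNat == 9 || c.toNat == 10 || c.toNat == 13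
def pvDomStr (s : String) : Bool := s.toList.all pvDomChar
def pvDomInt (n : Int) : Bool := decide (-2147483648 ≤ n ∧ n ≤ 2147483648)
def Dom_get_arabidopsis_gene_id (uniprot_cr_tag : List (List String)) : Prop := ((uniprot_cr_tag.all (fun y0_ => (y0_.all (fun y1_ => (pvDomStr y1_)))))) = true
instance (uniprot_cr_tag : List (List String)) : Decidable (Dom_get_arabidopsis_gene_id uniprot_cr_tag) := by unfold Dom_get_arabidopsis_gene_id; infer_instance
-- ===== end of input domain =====

-- B replaces the three parse_uniprot_cross_ref passes by one dispatch loop over a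
-- resource→index table and returns min of the collected set (objective: simpler).

-- ===== PORT A =====
-- cr[0] raises IndexError on an empty cr (excluded by Pre_); the "" default below is never
-- reached under Pre_. The try/except IndexError around the appends is dead code in Python
-- (slicing and the comprehension never raise) and is ported as the plain expressions.
def parse_uniprot_cross_ref (uniprot_cr_tag : List (List String)) (resource_abbr : String)
    (indices : Option (List Int)) : List (List String) :=
  match uniprot_cr_tag with
  | [] => []
  | cr :: rest =>
    let tail := parse_uniprot_cross_ref rest resource_abbr indices
    if PySem.Str.lower (PySem.List.pyGetD cr 0 "") == PySem.Str.lower resource_abbr then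
      (match indices with
       | none => PySem.List.slice cr (some 1) none
       | some idxs => ((PySem.List.enumerate cr 0).filter (fun p => idxs.contains p.1)).map (fun p => p.2)) :: tail
    else tail

def get_arabidopsis_gene_id (uniprot_cr_tag : List (List String)) : Option String :=
  let araport_list := parse_uniprot_cross_ref uniprot_cr_tag "Araport" (some [1])
  let tair_list := parse_uniprot_cross_ref uniprot_cr_tag "TAIR" (some [2])
  let ensemblplants_list := parse_uniprot_cross_ref uniprot_cr_tag "EnsemblPlants" (some [3])
  let gene_id_list := PySem.Set.ofList ((araport_list ++ tair_list ++ ensemblplants_list).flatMap (fun l => l))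
  -- sorted(gene_id_list)[0], returning None on IndexError
  PySem.List.pyGet? (PySem.List.sorted gene_id_list (fun x => x) false) 0

-- ===== PORT B =====
def pvResIdx : PySem.Dict String Int := PySem.Dict.ofList [("araport", 1), ("tair", 2), ("ensemblplants", 3)]

def get_arabidopsis_gene_id_alt (uniprot_cr_tag : List (List String)) : Option String :=
  let ids := uniprot_cr_tag.foldl (fun s cr =>
    -- cr[0] raises IndexError on an empty cr (excluded by Pre_); "" is never reached under Pre_
    match PySem.Dict.get? pvResIdx (PySem.Str.lower (PySem.List.pyGetD cr 0 "")) with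
    | some idx => if idx < (cr.length : Int) then PySem.Set.add s (PySem.List.pyGetD cr idx "") else s
    | none => s) PySem.Set.empty
  PySem.List.min? ids (fun x => x)

-- ===== PRECONDITION & SPEC =====
-- Pre_ excludes inputs containing an empty inner list: there cr[0] raises IndexError in A (and in B).
def Pre_get_arabidopsis_gene_id (uniprot_cr_tag : List (List String)) : Prop :=
  ∀ cr ∈ uniprot_cr_tag, cr ≠ []
instance (uniprot_cr_tag : List (List String)) : Decidable (Pre_get_arabidopsis_gene_id uniprot_cr_tag) := by unfold Pre_get_arabidopsis_gene_id; infer_instance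
def pvWitness_get_arabidopsis_gene_id : List (List String) := [["Araport", "AT1G01010"], ["TAIR", "locus:1", "AT1G01020"]]

def Spec_get_arabidopsis_gene_id (uniprot_cr_tag : List (List String)) (out : Option String) : Prop := out = get_arabidopsis_gene_id_alt uniprot_cr_tag
instance (uniprot_cr_tag : List (List String)) (out : Option String) : Decidable (Spec_get_arabidopsis_gene_id uniprot_cr_tag out) := by unfold Spec_get_arabidopsis_gene_id; infer_instance

-- ===== CLAIM (what is proved, stated in full; the proofs are below) =====
def Claim_equal_get_arabidopsis_gene_id : Prop := ∀ (uniprot_cr_tag : List (List String)), Dom_get_arabidopsis_gene_id uniprot_cr_tag → Pre_get_arabidopsis_gene_id uniprot_cr_tag → Spec_get_arabidopsis_gene_id uniprot_cr_tag (get_arabidopsis_gene_id uniprot_cr_tag)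

-- ===== LEMMAS AND PROOFS =====

-- the per-cr contribution both programs agree on
def pvHit (cr : List String) : Option String :=
  match PySem.Dict.get? pvResIdx (PySem.Str.lower (PySem.List.pyGetD cr 0 "")) with
  | some idx => if idx < (cr.length : Int) then some (PySem.List.pyGetD cr idx "") else none
  | none => none

lemma enumFilter (cr : List String) (s k : Int) :
    ((PySem.List.enumerate cr s).filter (fun p => [k].contains p.1)).map (fun p => p.2)
      = if s ≤ k ∧ k < s + cr.length then [PySem.List.pyGetD cr (k - s) ""] else [] := by
  have hcont : (fun (p : Int × String) => [k].contains p.1) = (fun p => p.1 == k) := by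
    funext p; by_cases h : p.1 = k <;> simp [h]
  rw [hcont]
  induction cr generalizing s with
  | nil =>
    rw [PySem.List.enumerate_nil, List.filter_nil, List.map_nil, if_neg]
    rintro ⟨h1, h2⟩; simp at h2; omega
  | cons x xs ih =>
    rw [PySem.List.enumerate_cons, List.filter_cons]
    by_cases h : s = k
    · have hb : ((s, x).1 == k) = true := by simp [h]
      rw [if_pos hb, List.map_cons, ih (s + 1), if_neg (by omega), if_pos (by simp; omega)]
      subst h
      simp [PySem.List.pyGetD]
    · have hb : ((s, x).1 == k) = false := by simp [h]
      rw [hb]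
      simp only [Bool.false_eq_true, if_false]
      rw [ih (s + 1)]
      by_cases hc : s + 1 ≤ k ∧ k < s + 1 + (xs.length : Int)
      · rw [if_pos hc, if_pos (by simp only [List.length_cons]; push_cast; omega)]
        have h2 : 0 ≤ k - (s + 1) := by omega
        rw [show k - s = (k - (s + 1)) + 1 by omega]
        have hstep := PySem.List.pyGet?_cons_succ (n := (k - (s + 1)).toNat) (x := x) (xs := xs)
        rw [Int.toNat_of_nonneg h2] at hstep
        simp [PySem.List.pyGetD, hstep]
      · have hcond : ¬(s ≤ k ∧ k < s + ((x :: xs).length : Int)) := by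
          simp only [List.length_cons]
          push_cast
          push_cast at hc
          omega
        rw [if_neg hc, if_neg hcond]

lemma mem_flat_parse (uniprot_cr_tag : List (List String)) (abbr : String) (k : Int)
    (hk : 0 < k) (x : String) :
    x ∈ (parse_uniprot_cross_ref uniprot_cr_tag abbr (some [k])).flatMap (fun l => l) ↔
      ∃ cr ∈ uniprot_cr_tag,
        PySem.Str.lower (PySem.List.pyGetD cr 0 "") = PySem.Str.lower abbr ∧
        k < (cr.length : Int) ∧ PySem.List.pyGetD cr k "" = x := by
  induction uniprot_cr_tag with
  | nil => simp [parse_uniprot_cross_ref]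
  | cons cr rest ih =>
    rw [parse_uniprot_cross_ref]
    by_cases h : PySem.Str.lower (PySem.List.pyGetD cr 0 "") = PySem.Str.lower abbr
    · rw [if_pos (by simpa using h)]
      rw [List.flatMap_cons]
      have he := enumFilter cr 0 k
      rw [sub_zero] at he
      simp only [he]
      by_cases hc : k < (cr.length : Int)
      · rw [if_pos ⟨by omega, by omega⟩]
        simp only [List.mem_append, List.mem_cons, List.not_mem_nil, or_false, ih]
        constructor
        · rintro (rfl | ⟨c, hc', hp⟩)
          · exact ⟨cr, Or.inl rfl, h, hc, rfl⟩
          · exact ⟨c, Or.inr hc', hp⟩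
        · rintro ⟨c, (rfl | hc'), hp⟩
          · exact Or.inl hp.2.2.symm
          · exact Or.inr ⟨c, hc', hp⟩
      · rw [if_neg (by omega)]
        simp only [List.nil_append, ih, List.mem_cons]
        constructor
        · rintro ⟨c, hc', hp⟩; exact ⟨c, Or.inr hc', hp⟩
        · rintro ⟨c, (rfl | hc'), hp⟩
          · exact absurd hp.2.1 hc
          · exact ⟨c, hc', hp⟩
    · rw [if_neg (by simpa using h)]
      simp only [ih, List.mem_cons]
      constructor
      · rintro ⟨c, hc', hp⟩; exact ⟨c, Or.inr hc', hp⟩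
      · rintro ⟨c, (rfl | hc'), hp⟩
        · exact absurd hp.1 h
        · exact ⟨c, hc', hp⟩

lemma mem_foldB (uniprot_cr_tag : List (List String)) (s : PySem.Set String) (x : String) :
    x ∈ uniprot_cr_tag.foldl (fun s cr =>
        match PySem.Dict.get? pvResIdx (PySem.Str.lower (PySem.List.pyGetD cr 0 "")) with
        | some idx => if idx < (cr.length : Int) then PySem.Set.add s (PySem.List.pyGetD cr idx "") else s
        | none => s) s
      ↔ x ∈ s ∨ ∃ cr ∈ uniprot_cr_tag, pvHit cr = some x := by
  induction uniprot_cr_tag generalizing s with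
  | nil => simp
  | cons cr rest ih =>
    rw [List.foldl_cons, ih]
    have hstep : (x ∈ (match PySem.Dict.get? pvResIdx (PySem.Str.lower (PySem.List.pyGetD cr 0 "")) with
        | some idx => if idx < (cr.length : Int) then PySem.Set.add s (PySem.List.pyGetD cr idx "") else s
        | none => s)) ↔ x ∈ s ∨ pvHit cr = some x := by
      rw [pvHit]
      cases hg : PySem.Dict.get? pvResIdx (PySem.Str.lower (PySem.List.pyGetD cr 0 "")) with
      | none => simp
      | some idx =>
        by_cases hlt : idx < (cr.length : Int)
        · simp only [if_pos hlt, PySem.Set.mem_add, Option.some.injEq]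
          constructor
          · rintro (h | h)
            · exact Or.inl h
            · exact Or.inr h.symm
          · rintro (h | h)
            · exact Or.inl h
            · exact Or.inr h.symm
        · simp [if_neg hlt]
    rw [hstep]
    simp only [List.mem_cons]
    constructor
    · rintro ((h | h) | ⟨c, hc, hp⟩)
      · exact Or.inl h
      · exact Or.inr ⟨cr, Or.inl rfl, h⟩
      · exact Or.inr ⟨c, Or.inr hc, hp⟩
    · rintro (h | ⟨c, (rfl | hc), hp⟩)
      · exact Or.inl (Or.inl h)
      · exact Or.inl (Or.inr hp)
      · exact Or.inr ⟨c, hc, hp⟩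

lemma pvHit_iff (cr : List String) (x : String) :
    pvHit cr = some x ↔
      ((PySem.Str.lower (PySem.List.pyGetD cr 0 "") = "araport" ∧ (1:Int) < cr.length ∧ PySem.List.pyGetD cr 1 "" = x) ∨
       (PySem.Str.lower (PySem.List.pyGetD cr 0 "") = "tair" ∧ (2:Int) < cr.length ∧ PySem.List.pyGetD cr 2 "" = x) ∨
       (PySem.Str.lower (PySem.List.pyGetD cr 0 "") = "ensemblplants" ∧ (3:Int) < cr.length ∧ PySem.List.pyGetD cr 3 "" = x)) := by
  rw [pvHit]
  set f := PySem.Str.lower (PySem.List.pyGetD cr 0 "") with hf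
  by_cases h1 : f = "araport"
  · rw [h1, show PySem.Dict.get? pvResIdx "araport" = some 1 from rfl]
    by_cases hlt : (1:Int) < cr.length
    · simp [hlt]
    · simp [hlt]
  · by_cases h2 : f = "tair"
    · rw [h2, show PySem.Dict.get? pvResIdx "tair" = some 2 from rfl]
      by_cases hlt : (2:Int) < cr.length
      · simp [hlt]
      · simp [hlt]
    · by_cases h3 : f = "ensemblplants"
      · rw [h3, show PySem.Dict.get? pvResIdx "ensemblplants" = some 3 from rfl]
        by_cases hlt : (3:Int) < cr.length
        · simp [hlt]
        · simp [hlt]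
      · have h1' : ("araport" == f) = false := by simp; exact fun e => h1 e.symm
        have h2' : ("tair" == f) = false := by simp; exact fun e => h2 e.symm
        have h3' : ("ensemblplants" == f) = false := by simp; exact fun e => h3 e.symm
        have hitems : pvResIdx.items = [("araport", (1:Int)), ("tair", 2), ("ensemblplants", 3)] := rfl
        have hnone : PySem.Dict.get? pvResIdx f = none := by
          simp [PySem.Dict.get?, hitems, h1', h2', h3']
        rw [hnone]
        simp [h1, h2, h3]

lemma AB_eq (uniprot_cr_tag : List (List String)) :
    get_arabidopsis_gene_id uniprot_cr_tag = get_arabidopsis_gene_id_alt uniprot_cr_tag := by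
  rw [get_arabidopsis_gene_id, get_arabidopsis_gene_id_alt]
  set flat := ((parse_uniprot_cross_ref uniprot_cr_tag "Araport" (some [1]) ++
      parse_uniprot_cross_ref uniprot_cr_tag "TAIR" (some [2]) ++
      parse_uniprot_cross_ref uniprot_cr_tag "EnsemblPlants" (some [3])).flatMap (fun l => l)) with hflat
  set ids := uniprot_cr_tag.foldl (fun s cr =>
        match PySem.Dict.get? pvResIdx (PySem.Str.lower (PySem.List.pyGetD cr 0 "")) with
        | some idx => if idx < (cr.length : Int) then PySem.Set.add s (PySem.List.pyGetD cr idx "") else s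
        | none => s) PySem.Set.empty with hids
  have hmem : ∀ x, x ∈ PySem.Set.ofList flat ↔ x ∈ ids := by
    intro x
    rw [PySem.Set.mem_ofList, hids, mem_foldB]
    have hA : x ∈ flat ↔
        (∃ cr ∈ uniprot_cr_tag, PySem.Str.lower (PySem.List.pyGetD cr 0 "") = "araport" ∧ (1:Int) < cr.length ∧ PySem.List.pyGetD cr 1 "" = x) ∨
        (∃ cr ∈ uniprot_cr_tag, PySem.Str.lower (PySem.List.pyGetD cr 0 "") = "tair" ∧ (2:Int) < cr.length ∧ PySem.List.pyGetD cr 2 "" = x) ∨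
        (∃ cr ∈ uniprot_cr_tag, PySem.Str.lower (PySem.List.pyGetD cr 0 "") = "ensemblplants" ∧ (3:Int) < cr.length ∧ PySem.List.pyGetD cr 3 "" = x) := by
      rw [hflat]
      have e1 : PySem.Str.lower "Araport" = "araport" := by decide
      have e2 : PySem.Str.lower "TAIR" = "tair" := by decide
      have e3 : PySem.Str.lower "EnsemblPlants" = "ensemblplants" := by decide
      rw [List.flatMap_append, List.flatMap_append]
      simp only [List.mem_append,
        mem_flat_parse uniprot_cr_tag "Araport" 1 (by norm_num) x,
        mem_flat_parse uniprot_cr_tag "TAIR" 2 (by norm_num) x,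
        mem_flat_parse uniprot_cr_tag "EnsemblPlants" 3 (by norm_num) x, e1, e2, e3]
      exact or_assoc
    rw [hA]
    simp only [pvHit_iff, PySem.Set.empty, List.not_mem_nil, false_or]
    constructor
    · rintro (⟨c, hc, hp⟩ | ⟨c, hc, hp⟩ | ⟨c, hc, hp⟩)
      · exact ⟨c, hc, Or.inl hp⟩
      · exact ⟨c, hc, Or.inr (Or.inl hp)⟩
      · exact ⟨c, hc, Or.inr (Or.inr hp)⟩
    · rintro ⟨c, hc, (hp | hp | hp)⟩
      · exact Or.inl ⟨c, hc, hp⟩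
      · exact Or.inr (Or.inl ⟨c, hc, hp⟩)
      · exact Or.inr (Or.inr ⟨c, hc, hp⟩)
  rcases hL : PySem.List.sorted (PySem.Set.ofList flat) (fun x => x) false with _ | ⟨m, t⟩
  · have hS : PySem.Set.ofList flat = [] := (PySem.List.sorted_eq_nil_iff _ _ _).mp hL
    have hids_nil : ids = [] := by
      cases hids' : ids with
      | nil => rfl
      | cons y ys =>
        exfalso
        have hy : y ∈ PySem.Set.ofList flat := (hmem y).mpr (by rw [hids']; exact List.mem_cons_self)
        rw [hS] at hy
        exact absurd hy List.not_mem_nil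
    rw [hids_nil, PySem.List.pyGet?_zero]
    exact ((PySem.List.min?_eq_none_iff [] _).mpr rfl).symm
  · rw [PySem.List.pyGet?_zero]
    have hmL : m ∈ PySem.Set.ofList flat := by
      rw [← PySem.List.mem_sorted (PySem.Set.ofList flat) (fun x => x) false, hL]
      exact List.mem_cons_self
    have hmids : m ∈ ids := (hmem m).mp hmL
    cases hmin : PySem.List.min? ids (fun x => x) with
    | none =>
      exfalso
      rw [PySem.List.min?_eq_none_iff] at hmin
      rw [hmin] at hmids
      exact absurd hmids List.not_mem_nil
    | some m' =>
      have hm'ids : m' ∈ ids := PySem.List.min?_mem hmin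
      have h1 : m ≤ m' := PySem.List.key_head_sorted_le (PySem.Set.ofList flat) (fun x => x) hL m' ((hmem m').mpr hm'ids)
      have h2 : m' ≤ m := PySem.List.min?_isMin hmin m hmids
      simp [le_antisymm h1 h2]

-- ===== VERDICT (by name: the statement is the Claim_ definition above) =====
theorem get_arabidopsis_gene_id_spec : Claim_equal_get_arabidopsis_gene_id := by
  intro tag _ _
  unfold Spec_get_arabidopsis_gene_id
  exact AB_eq tag
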